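-- pv_equiv track=rewrite | github.com/ralampay/strandex | strandex/agents/research_summarizer/agent.py | _guess_title_author
-- ===== SOURCE A (Python) =====
-- def _guess_title_author(text: str) -> tuple[str, str]:
--     lines = [line.strip() for line in text.splitlines() if line.strip()]
--     title = ""
--     author = ""
--     for line in lines[:6]:
--         if not title and len(line) > 5:
--             title = line
--             continue
--         lower = line.lower()
--         if "author" in lower or "authors" in lower:
--             author = line.replace("Authors:", "").replace("Author:", "").strip()
--             break
--         if not author and "," in line and len(line) < 120:
--             author = line
--     return title, author
-- ===== SOURCE B (Python) =====
-- def _guess_title_author(text: str) -> tuple[str, str]: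
--     lines = [l.strip() for l in text.splitlines() if l.strip()][:6]
--     t_idx = next((i for i, l in enumerate(lines) if len(l) > 5), None)
--     if t_idx is None:
--         title, rest = "", lines
--     else:
--         title, rest = lines[t_idx], lines[:t_idx] + lines[t_idx + 1:]
--     kw = next((l for l in rest if "author" in l.lower()), None)
--     if kw is not None:
--         author = kw.replace("Authors:", "").replace("Author:", "").strip()
--     else:
--         author = next((l for l in rest if "," in l and len(l) < 120), "")
--     return title, author
-- ===== Notes on version B (the rewrite author's own statement) =====
-- stated objective: alternative
-- what changed: Replaces A's single stateful loop (title/author flags, continue/break) by a two-pass decomposition: first locate the title line's index, then search the remaining lines once for a keyword author and once for a comma fallback.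
import Mathlib
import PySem

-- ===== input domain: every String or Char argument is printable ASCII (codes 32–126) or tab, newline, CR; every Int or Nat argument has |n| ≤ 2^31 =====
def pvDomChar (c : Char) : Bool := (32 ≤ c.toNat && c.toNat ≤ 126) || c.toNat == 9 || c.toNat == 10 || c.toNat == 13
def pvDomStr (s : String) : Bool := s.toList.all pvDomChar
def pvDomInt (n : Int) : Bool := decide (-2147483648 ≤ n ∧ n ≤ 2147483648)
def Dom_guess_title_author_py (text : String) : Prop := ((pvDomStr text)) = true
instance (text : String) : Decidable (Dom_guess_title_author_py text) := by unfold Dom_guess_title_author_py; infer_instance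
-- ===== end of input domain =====

-- B replaces A's single stateful loop by a two-pass decomposition (title index first, then two
-- separate author searches over the remaining lines); objective: alternative (same cost).

-- ===== PORT A =====
-- stripped non-empty lines (shared preprocessing of both Pythons' first line)
def pvLines (text : String) : List String :=
  ((PySem.Str.splitlines text).map PySem.Str.strip).filter (fun l => l ≠ "")

-- "Authors:"/"Author:" removal + strip, as both Pythons write it
def pvClean (l : String) : String :=
  PySem.Str.strip (PySem.Str.replace (PySem.Str.replace l "Authors:" "") "Author:" "")

-- A's for-loop over lines[:6] with state (title, author); break = returning immediately
def pvLoopA : List String → String → String → String × String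
  | [], title, author => (title, author)
  | line :: rest, title, author =>
    if title = "" ∧ 5 < PySem.Str.len line then
      pvLoopA rest line author
    else if PySem.Str.isIn "author" (PySem.Str.lower line) = true
         ∨ PySem.Str.isIn "authors" (PySem.Str.lower line) = true then
      (title, pvClean line)
    else if author = "" ∧ PySem.Str.isIn "," line = true ∧ PySem.Str.len line < 120 then
      pvLoopA rest title line
    else
      pvLoopA rest title author

def guess_title_author_py (text : String) : String × String :=
  pvLoopA (PySem.List.slice (pvLines text) none (some 6)) "" ""

-- ===== PORT B =====
-- Source B's two generator searches over `rest`
def pvAuthorB (rest : List String) : String :=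
  match rest.find? (fun l => PySem.Str.isIn "author" (PySem.Str.lower l)) with
  | some kw => pvClean kw
  | none =>
    ((rest.find? (fun l => PySem.Str.isIn "," l && decide (PySem.Str.len l < 120))).getD "")

def guess_title_author_py_alt (text : String) : String × String :=
  let lines := PySem.List.slice (pvLines text) none (some 6)
  match lines.findIdx? (fun l => decide (5 < PySem.Str.len l)) with
  | none => ("", pvAuthorB lines)
  | some i =>
    -- lines[t_idx] is in range by findIdx?; lines[:i] ++ lines[i+1:] is take/drop with natural bounds
    (lines.getD i "", pvAuthorB (lines.take i ++ lines.drop (i + 1)))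

-- ===== PRECONDITION & SPEC =====
def Spec_guess_title_author_py (text : String) (out : String × String) : Prop := out = guess_title_author_py_alt text
instance (text : String) (out : String × String) : Decidable (Spec_guess_title_author_py text out) := by unfold Spec_guess_title_author_py; infer_instance

-- ===== CLAIM (what is proved, stated in full; the proofs are below) =====
def Claim_equal_guess_title_author_py : Prop := ∀ (text : String), Dom_guess_title_author_py text → Spec_guess_title_author_py text (guess_title_author_py text)

-- ===== LEMMAS AND PROOFS =====

-- B's keyword test and the comma-fallback test, as Booleans
def pvKB (l : String) : Bool := PySem.Str.isIn "author" (PySem.Str.lower l)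
def pvC (l : String) : Bool := PySem.Str.isIn "," l && decide (PySem.Str.len l < 120)

-- accumulator version of B's author search
def pvAuthorB' (rest : List String) (a : String) : String :=
  match rest.find? pvKB with
  | some kw => pvClean kw
  | none => if a = "" then (rest.find? pvC).getD "" else a



theorem pvKOr_iff (l : String) :
    (PySem.Str.isIn "author" (PySem.Str.lower l) = true ∨ PySem.Str.isIn "authors" (PySem.Str.lower l) = true)
      ↔ pvKB l = true := by
  constructor
  · rintro (h | h)
    · exact h
    · have h2 := (PySem.Str.isIn_iff_infix _ _).1 h
      exact (PySem.Str.isIn_iff_infix _ _).2 (List.IsInfix.trans (by decide : ("author".toList <:+: "authors".toList)) h2)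
  · exact fun h => Or.inl h

theorem pvC_iff (l : String) : pvC l = true ↔ (PySem.Str.isIn "," l = true ∧ PySem.Str.len l < 120) := by
  unfold pvC; simp

theorem pvC_ne (l : String) (h : pvC l = true) : l ≠ "" := by
  have h2 := (PySem.Str.isIn_iff_infix _ _).1 ((pvC_iff l).1 h).1
  intro he; subst he
  exact absurd h2.sublist.length_le (by decide)

theorem pvKB_len (l : String) (h : pvKB l = true) : 5 < PySem.Str.len l := by
  have h3 := ((PySem.Str.isIn_iff_infix _ _).1 h).sublist.length_le
  have h4 : (PySem.Str.lower l).toList.length = l.toList.length := by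
    simp [PySem.Str.toList_lower, PySem.Chars.lower]
  have h6 : "author".toList.length = 6 := by decide
  rw [h4, h6] at h3
  rw [PySem.Str.len_eq]
  omega

-- one step of B's accumulator search, on a non-keyword line
theorem pvAuthorB'_step (l : String) (rest : List String) (a : String) (hk : pvKB l = false) :
    pvAuthorB' (l :: rest) a = pvAuthorB' rest (if a = "" ∧ pvC l = true then l else a) := by
  unfold pvAuthorB'
  rw [List.find?_cons_of_neg (by simp [hk]), List.find?_cons]
  rcases hfk : rest.find? pvKB with _ | kw
  · rcases hc : pvC l with _ | _
    · by_cases ha : a = "" <;> simp [ha]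
    · have hne := pvC_ne l hc
      by_cases ha : a = "" <;> simp [ha, hne]
  · by_cases ha : a = "" ∧ pvC l = true <;> simp

-- phase 2 of A's loop: with a non-empty title the loop is the author-only search
theorem pvLoopA_phase2 (rest : List String) : ∀ t a, t ≠ "" → pvLoopA rest t a = (t, pvAuthorB' rest a) := by
  induction rest with
  | nil => intro t a ht; unfold pvLoopA pvAuthorB'; by_cases h : a = "" <;> simp [h]
  | cons l rest ih =>
    intro t a ht
    unfold pvLoopA
    simp only [ht, false_and, if_false]
    by_cases hk : PySem.Str.isIn "author" (PySem.Str.lower l) = true ∨ PySem.Str.isIn "authors" (PySem.Str.lower l) = true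
    · rw [if_pos hk]
      unfold pvAuthorB'
      rw [List.find?_cons_of_pos ((pvKOr_iff l).1 hk)]
    · have hk' : pvKB l = false := by
        rcases h : pvKB l with _ | _
        · rfl
        · exact absurd ((pvKOr_iff l).2 h) hk
      rw [if_neg hk, pvAuthorB'_step l rest a hk']
      by_cases hca : a = "" ∧ PySem.Str.isIn "," l = true ∧ PySem.Str.len l < 120
      · rw [if_pos hca, if_pos ⟨hca.1, (pvC_iff l).2 hca.2⟩]
        exact ih t l ht
      · rw [if_neg hca, if_neg (fun h => hca ⟨h.1, (pvC_iff l).1 h.2⟩)]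
        exact ih t a ht

-- main loop lemma: A's loop from the empty-title state equals B's two-pass computation
theorem pvLoopA_main (ls : List String) : ∀ a, pvLoopA ls "" a =
    (match ls.findIdx? (fun l => decide (5 < PySem.Str.len l)) with
     | none => ("", pvAuthorB' ls a)
     | some i => (ls.getD i "", pvAuthorB' (ls.take i ++ ls.drop (i + 1)) a)) := by
  induction ls with
  | nil => intro a; unfold pvLoopA pvAuthorB'; by_cases h : a = "" <;> simp [h]
  | cons l rest ih =>
    intro a
    by_cases hp : 5 < PySem.Str.len l
    · have ht : l ≠ "" := by
        intro he; subst he; rw [PySem.Str.len_eq] at hp; exact absurd hp (by decide)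
      rw [List.findIdx?_cons]
      simp only [hp, decide_true]
      unfold pvLoopA
      rw [if_pos ⟨rfl, hp⟩]
      rw [pvLoopA_phase2 rest l a ht]
      simp
    · have hk' : pvKB l = false := by
        rcases h : pvKB l with _ | _
        · rfl
        · exact absurd (pvKB_len l h) hp
      have hk : ¬ (PySem.Str.isIn "author" (PySem.Str.lower l) = true ∨ PySem.Str.isIn "authors" (PySem.Str.lower l) = true) := by
        intro h
        rw [(pvKOr_iff l).1 h] at hk'
        simp at hk'
      unfold pvLoopA
      rw [if_neg (fun h => hp h.2), if_neg hk]
      rw [List.findIdx?_cons]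
      simp only [hp, decide_false, Bool.false_eq_true, if_false]
      have hstep : ∀ a', (a' = if a = "" ∧ pvC l = true then l else a) →
          (if a = "" ∧ PySem.Str.isIn "," l = true ∧ PySem.Str.len l < 120 then pvLoopA rest "" l
           else pvLoopA rest "" a) = pvLoopA rest "" a' := by
        intro a' ha'
        by_cases hca : a = "" ∧ PySem.Str.isIn "," l = true ∧ PySem.Str.len l < 120
        · rw [if_pos hca, ha', if_pos ⟨hca.1, (pvC_iff l).2 hca.2⟩]
        · rw [if_neg hca, ha', if_neg (fun h => hca ⟨h.1, (pvC_iff l).1 h.2⟩)]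
      rw [hstep _ rfl, ih _]
      rcases hf : rest.findIdx? (fun l => decide (5 < PySem.Str.len l)) with _ | i
      · show ("", pvAuthorB' rest (if a = "" ∧ pvC l = true then l else a)) = ("", pvAuthorB' (l :: rest) a)
        rw [pvAuthorB'_step l rest a hk']
      · show _ = ((l :: rest).getD (i + 1) "", pvAuthorB' ((l :: rest).take (i + 1) ++ (l :: rest).drop (i + 1 + 1)) a)
        have htd : (l :: rest).take (i + 1) ++ (l :: rest).drop (i + 1 + 1) = l :: (rest.take i ++ rest.drop (i + 1)) := by
          simp
        rw [htd, pvAuthorB'_step l _ a hk', List.getD_cons_succ]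

theorem pvAuthorB'_empty (rest : List String) : pvAuthorB' rest "" = pvAuthorB rest := by
  unfold pvAuthorB' pvAuthorB pvKB pvC
  rcases h : rest.find? (fun l => PySem.Str.isIn "author" (PySem.Str.lower l)) <;> simp

-- ===== VERDICT (by name: the statement is the Claim_ definition above) =====
theorem guess_title_author_py_spec : Claim_equal_guess_title_author_py := by
  intro text _
  unfold Spec_guess_title_author_py guess_title_author_py guess_title_author_py_alt
  rw [pvLoopA_main _ ""]
  rcases h : (PySem.List.slice (pvLines text) none (some 6)).findIdx? (fun l => decide (5 < PySem.Str.len l)) with _ | i <;>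
    simp only [h, pvAuthorB'_empty]
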